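-- pv_equiv track=rewrite | github.com/DonghakPark/TIL | Study_Problem_Solving/[pro]giveup_math_sol.py | solution
-- ===== SOURCE A (Python) =====
-- def solution(answers):
--     answer = []
--
--     student1 = [1,2,3,4,5]
--     student2 = [2,1,2,3,2,4,2,5]
--     student3 = [3,3,1,1,2,2,4,4,5,5]
--
--     cnt_1, cnt_2, cnt_3 = 0,0,0
--
--     for i in range(0,len(answers)):
--         if answers[i] == student1[i%5]:
--             cnt_1 += 1
--         if answers[i] == student2[i%8]:
--             cnt_2 += 1
--         if answers[i] == student3[i%10]:
--             cnt_3 += 1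
--
--     cnt = []
--     cnt.append([cnt_1,1])
--     cnt.append([cnt_2, 2])
--     cnt.append([cnt_3, 3])
--
--     cnt.sort(reverse = True)
--     max = cnt[0][0]
--     for element in cnt:
--         if element[0] == max:
--             answer.append(element[1])
--
--     answer.sort()
--     return answer
-- ===== SOURCE B (Python) =====
-- def solution(answers):
--     patterns = [
--         [1, 2, 3, 4, 5],
--         [2, 1, 2, 3, 2, 4, 2, 5],
--         [3, 3, 1, 1, 2, 2, 4, 4, 5, 5],
--     ]
--     # Frequency index over (position mod 40, answer) pairs; 40 = lcm(5, 8, 10),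
--     # so every pattern is constant on each residue class mod 40 and a student's
--     # score is just a sum of 40 table lookups -- no per-element comparison
--     # against any pattern.
--     freq = {}
--     for i, a in enumerate(answers):
--         key = (i % 40, a)
--         freq[key] = freq.get(key, 0) + 1
--     scores = [
--         sum(freq.get((j, p[j % len(p)]), 0) for j in range(40))
--         for p in patterns
--     ]
--     best = max(scores)
--     return [k + 1 for k, s in enumerate(scores) if s == best]
-- ===== Notes on version B (the rewrite author's own statement) =====
-- stated objective: alternative
-- what changed: B never compares answers to patterns element-by-element: it builds a frequency table of (index mod 40, answer) pairs in one pass (40 = lcm of the pattern periods), reads each student's score as a sum of 40 table lookups, and selects winners by max-and-filter instead of A's interleaved per-element triple count plus reverse pair-sort.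
import Mathlib
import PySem

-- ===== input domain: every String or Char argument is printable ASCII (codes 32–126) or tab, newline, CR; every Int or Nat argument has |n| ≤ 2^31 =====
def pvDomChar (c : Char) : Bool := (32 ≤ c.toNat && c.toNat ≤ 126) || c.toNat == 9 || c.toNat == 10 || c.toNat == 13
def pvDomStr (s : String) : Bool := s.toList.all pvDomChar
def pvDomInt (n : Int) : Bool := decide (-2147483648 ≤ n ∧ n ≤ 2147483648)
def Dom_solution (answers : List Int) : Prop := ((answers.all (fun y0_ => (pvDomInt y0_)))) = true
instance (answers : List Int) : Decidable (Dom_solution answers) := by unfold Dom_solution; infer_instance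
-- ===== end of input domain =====

-- B replaces A's per-element triple pattern comparison and reverse pair-sort with a one-pass
-- frequency table over (index mod 40, answer) pairs (40 = lcm of the pattern periods), scores
-- read off as 40 table lookups per student, and max/filter selection (objective: alternative).

-- ===== PORT A =====
-- A's [count, student] pairs are Python 2-lists compared lexicographically by cnt.sort(reverse=True);
-- they are ported as (count, student) pairs sorted by the lexicographic tuple sort PySem.List.sorted2.
def solution (answers : List Int) : List Int :=
  let student1 : List Int := [1,2,3,4,5]
  let student2 : List Int := [2,1,2,3,2,4,2,5]
  let student3 : List Int := [3,3,1,1,2,2,4,4,5,5]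
  let cnts :=
    (PySem.List.pyRange 0 answers.length 1).foldl
      (fun (s : Int × Int × Int) i =>
        (if PySem.List.pyGetD answers i 0 = PySem.List.pyGetD student1 (i % 5) 0 then s.1 + 1 else s.1,
         if PySem.List.pyGetD answers i 0 = PySem.List.pyGetD student2 (i % 8) 0 then s.2.1 + 1 else s.2.1,
         if PySem.List.pyGetD answers i 0 = PySem.List.pyGetD student3 (i % 10) 0 then s.2.2 + 1 else s.2.2))
      (0, 0, 0)
  let cnt : List (Int × Int) := [(cnts.1, 1), (cnts.2.1, 2), (cnts.2.2, 3)]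
  let cntS := PySem.List.sorted2 cnt (fun p => p.1) (fun p => p.2) true
  let mx := ((PySem.List.pyGet? cntS 0).getD (0, 0)).1
  let answer := cntS.foldl (fun ans e => if e.1 = mx then ans ++ [e.2] else ans) []
  PySem.List.sorted answer (fun x => x) false

-- ===== PORT B =====
def solution_alt (answers : List Int) : List Int :=
  let patterns : List (List Int) :=
    [[1,2,3,4,5], [2,1,2,3,2,4,2,5], [3,3,1,1,2,2,4,4,5,5]]
  let freq : PySem.Dict (Int × Int) Int :=
    (PySem.List.enumerate answers).foldl
      (fun d ia => d.insert (ia.1 % 40, ia.2) (d.getD (ia.1 % 40, ia.2) 0 + 1))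
      PySem.Dict.empty
  let scores := patterns.map (fun p =>
    ((PySem.List.pyRange 0 40 1).map
      (fun j => freq.getD (j, PySem.List.pyGetD p (j % (p.length : Int)) 0) 0)).sum)
  let best := (PySem.List.max? scores (fun x => x)).getD 0
  ((PySem.List.enumerate scores).filter (fun p => p.2 = best)).map (fun p => p.1 + 1)

-- ===== PRECONDITION & SPEC =====
def Spec_solution (answers : List Int) (out : List Int) : Prop := out = solution_alt answers
instance (answers : List Int) (out : List Int) : Decidable (Spec_solution answers out) := by unfold Spec_solution; infer_instance

-- ===== CLAIM (what is proved, stated in full; the proofs are below) =====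
def Claim_equal_solution : Prop := ∀ (answers : List Int), Dom_solution answers → Spec_solution answers (solution answers)

-- ===== LEMMAS AND PROOFS =====

-- comparator of A's reverse lexicographic pair sort, and a fast structural insertion helper
def pvB : (Int × Int) → (Int × Int) → Bool := fun a b =>
  decide (b.1 < a.1) || (!decide (a.1 < b.1) && decide (b.2 < a.2))

def myIns (b : (Int × Int) → (Int × Int) → Bool) (x : Int × Int) : List (Int × Int) → List (Int × Int)
  | [] => [x]
  | y :: ys => if b x y then x :: y :: ys else y :: myIns b x ys

lemma ib_nil (b : (Int × Int) → (Int × Int) → Bool) (x : Int × Int) :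
    PySem.List.insertBy b x [] = [x] := rfl

lemma ib_cons (b : (Int × Int) → (Int × Int) → Bool) (x y : Int × Int) (ys : List (Int × Int)) :
    PySem.List.insertBy b x (y :: ys) = if b x y then x :: y :: ys else y :: PySem.List.insertBy b x ys := rfl

lemma ins_eq (b : (Int × Int) → (Int × Int) → Bool) (x : Int × Int) (ys : List (Int × Int)) :
    PySem.List.insertBy b x ys = myIns b x ys := by
  induction ys with
  | nil => rw [ib_nil, myIns]
  | cons y ys ih => rw [ib_cons, ih, myIns]

lemma sorted2_eval (xs : List (Int × Int)) : PySem.List.sorted2 xs (fun p => p.1) (fun p => p.2) true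
    = xs.foldl (fun acc x => PySem.List.insertBy pvB x acc) [] := rfl

lemma best_eval (c1 c2 c3 : Int) :
    ((PySem.List.max? [c1, c2, c3] (fun x => x)).getD 0) = max (max c1 c2) c3 := by
  rw [PySem.List.max?_id_cons]; simp [List.foldl]

lemma pg_head (x : Int × Int) (l : List (Int × Int)) :
    ((PySem.List.pyGet? (x :: l) 0).getD (0, 0)) = x := by
  simp only [PySem.List.pyGet?, PySem.List.pyIdx?]
  norm_num

-- A's interleaved triple fold splits into three independent folds
lemma foldl_triple (l : List (Int × Int)) (f g h : Int → (Int × Int) → Int) (a b c : Int) :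
    l.foldl (fun (s : Int × Int × Int) x => (f s.1 x, g s.2.1 x, h s.2.2 x)) (a, b, c)
      = (l.foldl f a, l.foldl g b, l.foldl h c) := by
  induction l generalizing a b c with
  | nil => rfl
  | cons x t ih => simp only [List.foldl_cons]; rw [ih]

-- a conditional counting fold is the sum of a 0/1 map
lemma foldl_count_eq_sum (l : List (Int × Int)) (P : Int × Int → Prop) [DecidablePred P] (a : Int) :
    l.foldl (fun c x => if P x then c + 1 else c) a
      = a + (l.map (fun x => if P x then (1 : Int) else 0)).sum := by
  induction l generalizing a with
  | nil => simp
  | cons x t ih => by_cases h : P x <;> simp [List.foldl_cons, h, ih] <;> ring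

-- A's index loop over range(len(answers)) equals the fold over enumerate(answers)
lemma count_loop_eq (answers : List Int) :
    (PySem.List.pyRange 0 answers.length 1).foldl
      (fun (s : Int × Int × Int) i =>
        (if PySem.List.pyGetD answers i 0 = PySem.List.pyGetD [1,2,3,4,5] (i % 5) 0 then s.1 + 1 else s.1,
         if PySem.List.pyGetD answers i 0 = PySem.List.pyGetD [2,1,2,3,2,4,2,5] (i % 8) 0 then s.2.1 + 1 else s.2.1,
         if PySem.List.pyGetD answers i 0 = PySem.List.pyGetD [3,3,1,1,2,2,4,4,5,5] (i % 10) 0 then s.2.2 + 1 else s.2.2))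
      (0, 0, 0)
    = (((PySem.List.enumerate answers).map
          (fun ia => if ia.2 = PySem.List.pyGetD [1,2,3,4,5] (ia.1 % 5) 0 then (1 : Int) else 0)).sum,
       ((PySem.List.enumerate answers).map
          (fun ia => if ia.2 = PySem.List.pyGetD [2,1,2,3,2,4,2,5] (ia.1 % 8) 0 then (1 : Int) else 0)).sum,
       ((PySem.List.enumerate answers).map
          (fun ia => if ia.2 = PySem.List.pyGetD [3,3,1,1,2,2,4,4,5,5] (ia.1 % 10) 0 then (1 : Int) else 0)).sum) := by
  have he : PySem.List.enumerate answers
      = (PySem.List.pyRange 0 answers.length 1).map (fun j => (j, PySem.List.pyGetD answers j 0)) :=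
    PySem.List.enumerate_eq_map_pyRange answers 0
  calc (PySem.List.pyRange 0 answers.length 1).foldl
        (fun (s : Int × Int × Int) i =>
          (if PySem.List.pyGetD answers i 0 = PySem.List.pyGetD [1,2,3,4,5] (i % 5) 0 then s.1 + 1 else s.1,
           if PySem.List.pyGetD answers i 0 = PySem.List.pyGetD [2,1,2,3,2,4,2,5] (i % 8) 0 then s.2.1 + 1 else s.2.1,
           if PySem.List.pyGetD answers i 0 = PySem.List.pyGetD [3,3,1,1,2,2,4,4,5,5] (i % 10) 0 then s.2.2 + 1 else s.2.2))
        (0, 0, 0)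
      = (PySem.List.enumerate answers).foldl
        (fun (s : Int × Int × Int) p =>
          (if (fun (p : Int × Int) => p.2 = PySem.List.pyGetD [1,2,3,4,5] (p.1 % 5) 0) p then s.1 + 1 else s.1,
           if (fun (p : Int × Int) => p.2 = PySem.List.pyGetD [2,1,2,3,2,4,2,5] (p.1 % 8) 0) p then s.2.1 + 1 else s.2.1,
           if (fun (p : Int × Int) => p.2 = PySem.List.pyGetD [3,3,1,1,2,2,4,4,5,5] (p.1 % 10) 0) p then s.2.2 + 1 else s.2.2))
        (0, 0, 0) := by rw [he, List.foldl_map]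
    _ = ((PySem.List.enumerate answers).foldl (fun c p => if (fun (p : Int × Int) => p.2 = PySem.List.pyGetD [1,2,3,4,5] (p.1 % 5) 0) p then c + 1 else c) 0,
         (PySem.List.enumerate answers).foldl (fun c p => if (fun (p : Int × Int) => p.2 = PySem.List.pyGetD [2,1,2,3,2,4,2,5] (p.1 % 8) 0) p then c + 1 else c) 0,
         (PySem.List.enumerate answers).foldl (fun c p => if (fun (p : Int × Int) => p.2 = PySem.List.pyGetD [3,3,1,1,2,2,4,4,5,5] (p.1 % 10) 0) p then c + 1 else c) 0) :=
      foldl_triple (PySem.List.enumerate answers)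
        (fun c p => if (fun (p : Int × Int) => p.2 = PySem.List.pyGetD [1,2,3,4,5] (p.1 % 5) 0) p then c + 1 else c)
        (fun c p => if (fun (p : Int × Int) => p.2 = PySem.List.pyGetD [2,1,2,3,2,4,2,5] (p.1 % 8) 0) p then c + 1 else c)
        (fun c p => if (fun (p : Int × Int) => p.2 = PySem.List.pyGetD [3,3,1,1,2,2,4,4,5,5] (p.1 % 10) 0) p then c + 1 else c) 0 0 0
    _ = _ := by
        rw [foldl_count_eq_sum _ (fun (p : Int × Int) => p.2 = PySem.List.pyGetD [1,2,3,4,5] (p.1 % 5) 0), foldl_count_eq_sum _ (fun (p : Int × Int) => p.2 = PySem.List.pyGetD [2,1,2,3,2,4,2,5] (p.1 % 8) 0), foldl_count_eq_sum _ (fun (p : Int × Int) => p.2 = PySem.List.pyGetD [3,3,1,1,2,2,4,4,5,5] (p.1 % 10) 0)]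
        simp only [zero_add]

-- B's counting-dict loop, re-indexed through its key map, counts keyed occurrences
lemma getD_foldl_insert_key (key : (Int × Int) → Int × Int) (l : List (Int × Int))
    (d : PySem.Dict (Int × Int) Int) (v : Int × Int) :
    (l.foldl (fun d ia => d.insert (key ia) (d.getD (key ia) 0 + 1)) d).getD v 0
      = d.getD v 0 + ((l.map key).count v : Int) := by
  induction l generalizing d with
  | nil => simp
  | cons x t ih =>
    simp only [List.foldl_cons, List.map_cons]
    rw [ih, PySem.Dict.getD_insert, List.count_cons]
    by_cases h : v = key x
    · simp only [h, beq_self_eq_true, if_true]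
      push_cast; ring
    · simp only [if_neg h, beq_iff_eq]
      rw [if_neg (fun he => h he.symm)]
      push_cast; ring

lemma freq_getD (answers : List Int) (v : Int × Int) :
    ((PySem.List.enumerate answers).foldl
      (fun d ia => d.insert (ia.1 % 40, ia.2) (d.getD (ia.1 % 40, ia.2) 0 + 1))
      PySem.Dict.empty).getD v 0
    = (((PySem.List.enumerate answers).map (fun ia => (ia.1 % 40, ia.2))).count v : Int) := by
  have h := getD_foldl_insert_key (fun ia => (ia.1 % 40, ia.2))
    (PySem.List.enumerate answers) PySem.Dict.empty v
  rw [PySem.Dict.getD_empty, zero_add] at h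
  exact h

-- swapping the indicator sum: one term of Σ_{j∈R} [x = (j, w j)] survives, at j = x.1
lemma sum_ind (R : List Int) (hnd : R.Nodup) (w : Int → Int) (x : Int × Int) (hx : x.1 ∈ R) :
    (R.map (fun j => if x = (j, w j) then (1:Int) else 0)).sum
      = if x.2 = w x.1 then 1 else 0 := by
  induction R with
  | nil => cases hx
  | cons r t ih =>
    simp only [List.map_cons, List.sum_cons]
    rcases List.mem_cons.mp hx with h | h
    · have hz : (t.map (fun j => if x = (j, w j) then (1:Int) else 0)).sum = 0 := by
        apply List.sum_eq_zero; intro y hy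
        obtain ⟨j, hj, rfl⟩ := List.mem_map.mp hy
        have hne : x ≠ (j, w j) := by
          intro he
          have hrj : r = j := by rw [← h, he]
          exact (List.nodup_cons.mp hnd).1 (hrj ▸ hj)
        simp [hne]
      rw [hz, add_zero]
      obtain ⟨x1, x2⟩ := x
      simp only at h
      subst h
      simp [Prod.ext_iff]
    · have hr : x ≠ (r, w r) := by
        intro he
        have hxr : x.1 = r := by rw [he]
        exact (List.nodup_cons.mp hnd).1 (hxr ▸ h)
      rw [if_neg hr, ih (List.nodup_cons.mp hnd).2 h, zero_add]

lemma sum_count_swap (R : List Int) (hnd : R.Nodup) (w : Int → Int) (L : List (Int × Int))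
    (hL : ∀ x ∈ L, x.1 ∈ R) :
    (R.map (fun j => ((L.count (j, w j) : Int)))).sum
      = (L.map (fun x => if x.2 = w x.1 then (1:Int) else 0)).sum := by
  induction L with
  | nil => simp
  | cons x t ih =>
    have ht := ih (fun y hy => hL y (List.mem_cons_of_mem _ hy))
    have hx := hL x (List.mem_cons_self)
    have hstep : ∀ j : Int, ((((x :: t).count (j, w j)) : Int))
        = (t.count (j, w j) : Int) + (if x = (j, w j) then (1:Int) else 0) := by
      intro j
      rw [List.count_cons]
      by_cases h : x = (j, w j) <;> simp [h]
    calc (R.map (fun j => (((x :: t).count (j, w j)) : Int))).sum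
        = (R.map (fun j => (t.count (j, w j) : Int) + (if x = (j, w j) then (1:Int) else 0))).sum := by
          exact congrArg List.sum (List.map_congr_left (fun j _ => hstep j))
      _ = (R.map (fun j => (t.count (j, w j) : Int))).sum
            + (R.map (fun j => if x = (j, w j) then (1:Int) else 0)).sum := by
          rw [← List.sum_map_add]
      _ = _ := by
          rw [ht, sum_ind R hnd w x hx]
          simp only [List.map_cons, List.sum_cons]
          ring

-- every key produced by B's dict loop has its residue inside range(40)
lemma keys_in_range (answers : List Int) :
    ∀ x ∈ (PySem.List.enumerate answers).map (fun ia => (ia.1 % 40, ia.2)),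
      x.1 ∈ PySem.List.pyRange 0 40 1 := by
  intro x hx
  obtain ⟨ia, _, rfl⟩ := List.mem_map.mp hx
  exact PySem.List.mem_pyRange_one.mpr
    ⟨Int.emod_nonneg _ (by norm_num), Int.emod_lt_of_pos _ (by norm_num)⟩

-- B's 40 table lookups for a pattern of period m ∣ 40 equal A's 0/1 sum for that pattern
lemma score_eq (answers : List Int) (p : List Int) (m : Int)
    (hm : ((p.length : Int)) = m) (hdvd : m ∣ 40) :
    ((PySem.List.pyRange 0 40 1).map
      (fun j => (((PySem.List.enumerate answers).map (fun ia => (ia.1 % 40, ia.2))).count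
        (j, PySem.List.pyGetD p (j % (p.length : Int)) 0) : Int))).sum
    = ((PySem.List.enumerate answers).map
        (fun ia => if ia.2 = PySem.List.pyGetD p (ia.1 % m) 0 then (1:Int) else 0)).sum := by
  rw [hm]
  rw [sum_count_swap (PySem.List.pyRange 0 40 1) (by decide)
      (fun j => PySem.List.pyGetD p (j % m) 0) _ (keys_in_range answers)]
  rw [List.map_map]
  apply congrArg List.sum
  apply List.map_congr_left
  intro ia _
  simp only [Function.comp]
  rw [Int.emod_emod_of_dvd _ hdvd]

set_option maxHeartbeats 4000000 in
set_option maxRecDepth 8000 in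
-- A's "reverse pair-sort, take head count, collect, sort" equals B's "max, filter, shift" on any counts
lemma sel_eq (c1 c2 c3 : Int) :
    (let cntS := PySem.List.sorted2 [(c1, (1:Int)), (c2, 2), (c3, 3)] (fun p => p.1) (fun p => p.2) true
     let mx := ((PySem.List.pyGet? cntS 0).getD (0, 0)).1
     PySem.List.sorted (cntS.foldl (fun ans e => if e.1 = mx then ans ++ [e.2] else ans) []) (fun x => x) false)
    = (let best := ((PySem.List.max? [c1, c2, c3] (fun x => x)).getD 0)
       ((PySem.List.enumerate [c1, c2, c3] 0).filter (fun p => p.2 = best)).map (fun p => p.1 + 1)) := by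
  rw [best_eval, sorted2_eval]
  simp only [List.foldl_cons, List.foldl_nil, ins_eq, myIns, pvB, decide_eq_true_eq,
    Bool.or_eq_true, Bool.and_eq_true, Bool.not_eq_true', decide_eq_false_iff_not,
    PySem.List.enumerate_cons, PySem.List.enumerate_nil]
  split_ifs <;>
    simp only [myIns, pvB, decide_eq_true_eq, Bool.or_eq_true, Bool.and_eq_true,
      Bool.not_eq_true', decide_eq_false_iff_not] <;>
    split_ifs
  all_goals simp only [pg_head]
  all_goals simp only [List.foldl_cons, List.foldl_nil, List.filter_cons, List.filter_nil,
    decide_eq_true_eq, List.nil_append]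
  all_goals split_ifs
  all_goals simp only [List.map_cons, List.map_nil, List.cons_append, List.nil_append]
  all_goals first | decide | (exfalso; omega)

-- ===== VERDICT (by name: the statement is the Claim_ definition above) =====
theorem solution_spec : Claim_equal_solution := by
  intro answers _
  unfold Spec_solution solution solution_alt
  simp only [List.map_cons, List.map_nil, freq_getD]
  rw [count_loop_eq,
    score_eq answers [1,2,3,4,5] 5 (by norm_num) (by norm_num),
    score_eq answers [2,1,2,3,2,4,2,5] 8 (by norm_num) (by norm_num),
    score_eq answers [3,3,1,1,2,2,4,4,5,5] 10 (by norm_num) (by norm_num)]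
  exact sel_eq _ _ _
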